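-- pv_equiv track=rewrite | github.com/marina-moiseenko/combinatorics | main.py | is_final
-- ===== SOURCE A (Python) =====
-- def is_final(alphabet, permutation, start_index=0):
--     used_elements = permutation[:start_index]
--     check_this = permutation[start_index:]
--     alphabet = alphabet[:]
--     for e in used_elements:
--         if alphabet.count(e) > 0:
--             alphabet.remove(e)
--     return alphabet[:-len(check_this)-1:-1] == check_this
-- ===== SOURCE B (Python) =====
-- def is_final(alphabet, permutation, start_index=0):
--     used = permutation[:start_index]
--     check = permutation[start_index:]
--     need = {}
--     for e in used:
--         need[e] = need.get(e, 0) + 1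
--     kept = []
--     for x in alphabet:
--         if need.get(x, 0) > 0:
--             need[x] -= 1
--         else:
--             kept.append(x)
--     if not check:
--         return True
--     return kept[-len(check):] == check[::-1]
-- ===== Notes on version B (the rewrite author's own statement) =====
-- stated objective: faster
-- what changed: Replaces the quadratic count+remove loop over the used prefix with a dict multiset of needed removals and one order-preserving filter pass over the alphabet, and compares the kept tail against the reversed remainder directly.
import Mathlib
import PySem

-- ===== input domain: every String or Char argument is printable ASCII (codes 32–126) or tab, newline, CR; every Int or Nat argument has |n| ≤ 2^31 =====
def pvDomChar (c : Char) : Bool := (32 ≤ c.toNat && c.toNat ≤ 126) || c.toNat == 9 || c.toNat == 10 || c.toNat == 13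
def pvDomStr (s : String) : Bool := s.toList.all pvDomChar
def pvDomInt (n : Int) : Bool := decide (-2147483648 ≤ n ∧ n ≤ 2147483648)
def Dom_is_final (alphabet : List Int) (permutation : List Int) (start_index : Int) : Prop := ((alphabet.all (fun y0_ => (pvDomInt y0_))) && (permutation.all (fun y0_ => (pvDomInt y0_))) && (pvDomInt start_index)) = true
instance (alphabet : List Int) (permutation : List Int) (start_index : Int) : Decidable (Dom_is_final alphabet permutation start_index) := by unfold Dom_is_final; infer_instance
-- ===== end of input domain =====

-- B replaces A's quadratic count+remove loop by a dict of needed removals and one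
-- order-preserving filter pass over the alphabet (objective: faster, asymptotic).

-- ===== PORT A =====
def is_final (alphabet : List Int) (permutation : List Int) (start_index : Int) : Bool :=
  let used_elements := PySem.List.slice permutation none (some start_index)
  let check_this := PySem.List.slice permutation (some start_index) none
  let alph := used_elements.foldl
    (fun a e => if 0 < PySem.List.count a e then (PySem.List.remove? a e).getD a else a)
    alphabet
  decide ((PySem.List.slice? alph none (some (-(check_this.length : Int) - 1)) (-1)).getD []
          = check_this)

-- ===== PORT B =====
def is_final_alt (alphabet : List Int) (permutation : List Int) (start_index : Int) : Bool :=
  let used := PySem.List.slice permutation none (some start_index)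
  let check := PySem.List.slice permutation (some start_index) none
  let need : PySem.Dict Int Int :=
    used.foldl (fun d e => d.insert e (d.getD e 0 + 1)) PySem.Dict.empty
  let r := alphabet.foldl
    (fun (p : List Int × PySem.Dict Int Int) x =>
      if 0 < p.2.getD x 0 then (p.1, p.2.insert x (p.2.getD x 0 - 1))
      else (p.1 ++ [x], p.2))
    ([], need)
  let kept := r.1
  if check = [] then true
  else decide (PySem.List.slice kept (some (-(check.length : Int))) none = check.reverse)

-- ===== PRECONDITION & SPEC =====
def Spec_is_final (alphabet : List Int) (permutation : List Int) (start_index : Int) (out : Bool) : Prop := out = is_final_alt alphabet permutation start_index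
instance (alphabet : List Int) (permutation : List Int) (start_index : Int) (out : Bool) : Decidable (Spec_is_final alphabet permutation start_index out) := by unfold Spec_is_final; infer_instance

-- ===== CLAIM (what is proved, stated in full; the proofs are below) =====
def Claim_equal_is_final : Prop := ∀ (alphabet : List Int) (permutation : List Int) (start_index : Int), Dom_is_final alphabet permutation start_index → Spec_is_final alphabet permutation start_index (is_final alphabet permutation start_index)

-- ===== LEMMAS AND PROOFS =====

-- counted first-occurrence filter: drop each x while its pending count is positive
def filterC : List Int → (Int → Int) → List Int
  | [], _ => []
  | x :: t, f =>
      if 0 < f x then filterC t (fun v => if v = x then f x - 1 else f v)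
      else x :: filterC t f

theorem filterC_congr (xs : List Int) (f g : Int → Int) (h : ∀ v ∈ xs, f v = g v) :
    filterC xs f = filterC xs g := by
  induction xs generalizing f g with
  | nil => rfl
  | cons x t ih =>
      have hx : f x = g x := h x (by simp)
      simp only [filterC, hx]
      split_ifs with hp
      · exact ih _ _ (fun v hv => by by_cases hvx : v = x <;> simp [hvx, h v (by simp [hv])])
      · exact congrArg _ (ih _ _ (fun v hv => h v (by simp [hv])))

theorem filterC_zero (xs : List Int) (f : Int → Int) (h : ∀ v ∈ xs, f v = 0) :
    filterC xs f = xs := by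
  induction xs generalizing f with
  | nil => rfl
  | cons x t ih =>
      have hx : f x = 0 := h x (by simp)
      simp only [filterC, hx]
      norm_num
      exact ih f (fun v hv => h v (by simp [hv]))

-- removing the first e then counted-filtering = counted-filtering with one more e
theorem filterC_remove (xs : List Int) (f : Int → Int) (e : Int) (hf : ∀ v, 0 ≤ f v) :
    filterC (if 0 < PySem.List.count xs e then (PySem.List.remove? xs e).getD xs else xs) f
      = filterC xs (fun v => if v = e then f v + 1 else f v) := by
  induction xs generalizing f with
  | nil => simp [PySem.List.count_eq, filterC]
  | cons x t ih =>
      by_cases hxe : x = e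
      · subst hxe
        rw [if_pos (by simp [PySem.List.count_eq]),
          PySem.List.remove?_cons_self, Option.getD_some]
        refine Eq.symm ?_
        simp only [filterC]
        rw [if_pos (by simp; have := hf x; omega)]
        refine filterC_congr _ _ _ (fun v _ => ?_)
        by_cases hv : v = x
        · simp [hv]
        · simp [hv]
      · by_cases hc : 0 < List.count e t
        · have he : e ∈ t := List.count_pos_iff.mp hc
          have hrw : (PySem.List.remove? t e).getD t = t.erase e := by
            rw [PySem.List.remove?_eq_some_erase t e he, Option.getD_some]
          rw [if_pos (by
              simp only [PySem.List.count_eq, List.count_cons, beq_iff_eq, if_neg hxe]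
              omega),
            PySem.List.remove?_cons_of_ne t hxe, PySem.List.remove?_eq_some_erase t e he,
            Option.map_some, Option.getD_some]
          have hgx : (if x = e then f x + 1 else f x) = f x := if_neg hxe
          simp only [filterC, hgx]
          split_ifs with hp
          · have := ih (fun v => if v = x then f x - 1 else f v)
              (fun v => by
                by_cases hv : v = x
                · simp [hv]; omega
                · simpa [hv] using hf v)
            rw [if_pos (by simpa [PySem.List.count_eq] using hc), hrw] at this
            rw [this]
            exact filterC_congr _ _ _ (fun v _ => by
              by_cases hv : v = e <;> by_cases hvx : v = x <;> simp_all)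
          · have := ih f hf
            rw [if_pos (by simpa [PySem.List.count_eq] using hc), hrw] at this
            rw [this]
        · have he : e ∉ t := fun h => hc (List.count_pos_iff.mpr h)
          rw [if_neg (by
            simp only [PySem.List.count_eq, List.count_cons, beq_iff_eq, if_neg hxe]
            omega)]
          refine filterC_congr _ _ _ (fun v hv => ?_)
          have hve : v ≠ e := by
            rintro rfl
            rcases List.mem_cons.mp hv with h | h
            · exact hxe h.symm
            · exact he h
          simp [hve]

theorem fold_remove_eq_filterC (used : List Int) (alphabet : List Int) :
    used.foldl
      (fun a e => if 0 < PySem.List.count a e then (PySem.List.remove? a e).getD a else a)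
      alphabet
    = filterC alphabet (fun v => (used.count v : Int)) := by
  induction used generalizing alphabet with
  | nil => exact (filterC_zero _ _ (fun v _ => by simp)).symm
  | cons e rest ih =>
      simp only [List.foldl_cons]
      rw [ih, filterC_remove _ _ _ (fun v => by positivity)]
      exact filterC_congr _ _ _ (fun v _ => by
        by_cases hv : v = e <;> simp [hv, List.count_cons] <;> omega)

theorem fold_keep_eq_filterC (xs : List Int) (acc : List Int) (d : PySem.Dict Int Int) :
    (xs.foldl
      (fun (p : List Int × PySem.Dict Int Int) x =>
        if 0 < p.2.getD x 0 then (p.1, p.2.insert x (p.2.getD x 0 - 1))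
        else (p.1 ++ [x], p.2))
      (acc, d)).1
    = acc ++ filterC xs (fun v => d.getD v 0) := by
  induction xs generalizing acc d with
  | nil => simp [filterC]
  | cons x t ih =>
      simp only [List.foldl_cons, filterC]
      split_ifs with hp
      · rw [ih]
        congr 1
        exact filterC_congr _ _ _ (fun v _ => by
          by_cases hv : v = x <;> simp [PySem.Dict.getD_insert, hv])
      · rw [ih, List.append_assoc]; rfl

-- A's extended slice xs[:-k-1:-1] is the reversed k-suffix
theorem S2 (xs : List Int) (m : Nat) (hm : m ≤ xs.length) :
    (List.range m).filterMap (fun (j : Nat) => xs[(((xs.length:Int) - 1) + -(j:Int)).toNat]?) =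
      (xs.drop (xs.length - m)).reverse := by
  induction m with
  | zero => simp
  | succ m ih =>
      rw [List.range_succ, List.filterMap_append, ih (le_of_lt (Nat.lt_of_succ_le hm))]
      have hidx : ((((xs.length:Int) - 1) + -(m:Int)).toNat) = xs.length - 1 - m := by
        omega
      have hlt : xs.length - 1 - m < xs.length := by omega
      rw [List.filterMap_cons]
      simp only [List.filterMap_nil]
      rw [hidx, List.getElem?_eq_getElem hlt]
      have hdrop : xs.drop (xs.length - (m+1)) = xs[xs.length - 1 - m] :: xs.drop (xs.length - m) := by
        have h1 : xs.length - (m+1) < xs.length := by omega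
        rw [List.drop_eq_getElem_cons h1]
        congr 1
        · congr 1; omega
        · congr 1; omega
      rw [hdrop]
      simp

theorem slice_rev_suffix (xs : List Int) (k : Nat) :
    PySem.List.slice? xs none (some (-(k : Int) - 1)) (-1)
      = some ((xs.drop (xs.length - k)).reverse) := by
  have h1 : (-(k:Int)) < 1 := by omega
  simp only [PySem.List.slice?, PySem.List.sliceIndices]
  norm_num
  simp only [if_pos h1]
  have hmin : min k xs.length ≤ xs.length := Nat.min_le_right _ _
  have hS := S2 xs (min k xs.length) hmin
  rw [show xs.length - min k xs.length = xs.length - k from by omega] at hS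
  rw [← hS]
  congr 2
  split_ifs with h2 <;> omega

-- ===== VERDICT (by name: the statement is the Claim_ definition above) =====
theorem is_final_spec : Claim_equal_is_final := by
  intro alphabet permutation start_index _
  unfold Spec_is_final is_final is_final_alt
  simp only []
  set check := PySem.List.slice permutation (some start_index) none with hc
  set used := PySem.List.slice permutation none (some start_index) with hu
  rw [fold_remove_eq_filterC, fold_keep_eq_filterC, slice_rev_suffix, List.nil_append]
  have hneed : (fun v => (used.foldl (fun d e => d.insert e (d.getD e 0 + 1))
      PySem.Dict.empty).getD v 0) = fun v => (used.count v : Int) := by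
    funext v; simp [PySem.Dict.getD_foldl_insert_add_one]
  rw [hneed]
  by_cases hck : check = []
  · simp [hck]
  · rw [if_neg hck,
      PySem.List.slice_from_neg_natCast _ _ (by simpa [List.length_pos_iff] using hck)]
    simp [List.reverse_eq_iff]
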